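-- pv_equiv track=rewrite | github.com/kiryuchi10/ai-ui-builder | autodevflow/agent/router.py | _analyze_inputs
-- ===== SOURCE A (Python) =====
-- from typing import Dict, List, Any, Optional
--
-- def _analyze_inputs(inputs: Dict[str, Any]) -> List[str]:
--     """Analyze inputs to determine which tools are needed"""
--     required_tools = []
--
--     # Check for image inputs
--     if any(key in inputs for key in ["image_path", "screenshot", "ui_image"]):
--         required_tools.extend(["vision_detect", "ocr"])
--
--     # Check for natural language inputs
--     if any(key in inputs for key in ["nl_spec", "specification", "requirements"]):
--         required_tools.append("nl2api")
--
--     # Check for component inputs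
--     if any(key in inputs for key in ["components", "layout_graph"]):
--         required_tools.append("ui2code")
--
--     # Check for code inputs
--     if any(key in inputs for key in ["code_path", "files", "directory"]):
--         required_tools.append("quality")
--
--     # Check for API spec inputs
--     if any(key in inputs for key in ["openapi_spec", "api_endpoints"]):
--         required_tools.append("doc_gen")
--
--     return required_tools
-- ===== SOURCE B (Python) =====
-- _KEY_CAT = {
--     "image_path": 0, "screenshot": 0, "ui_image": 0,
--     "nl_spec": 1, "specification": 1, "requirements": 1,
--     "components": 2, "layout_graph": 2,
--     "code_path": 3, "files": 3, "directory": 3,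
--     "openapi_spec": 4, "api_endpoints": 4,
-- }
-- _CAT_TOOLS = [["vision_detect", "ocr"], ["nl2api"], ["ui2code"], ["quality"], ["doc_gen"]]
--
-- def _analyze_inputs(inputs):
--     """Single pass over the input keys through an inverted key->category index,
--     then emit the tools of each hit category in fixed category order."""
--     hit = set()
--     for key in inputs:
--         cat = _KEY_CAT.get(key)
--         if cat is not None:
--             hit.add(cat)
--     required_tools = []
--     for cat in range(5):
--         if cat in hit:
--             required_tools.extend(_CAT_TOOLS[cat])
--     return required_tools
-- ===== Notes on version B (the rewrite author's own statement) =====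
-- stated objective: alternative
-- what changed: Inverted the traversal: instead of testing each hard-coded key list for membership in the dict, B scans the input keys once through a key->category index, collects the set of hit categories, and then emits the tools per category in a fixed-order second phase.
import Mathlib
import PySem

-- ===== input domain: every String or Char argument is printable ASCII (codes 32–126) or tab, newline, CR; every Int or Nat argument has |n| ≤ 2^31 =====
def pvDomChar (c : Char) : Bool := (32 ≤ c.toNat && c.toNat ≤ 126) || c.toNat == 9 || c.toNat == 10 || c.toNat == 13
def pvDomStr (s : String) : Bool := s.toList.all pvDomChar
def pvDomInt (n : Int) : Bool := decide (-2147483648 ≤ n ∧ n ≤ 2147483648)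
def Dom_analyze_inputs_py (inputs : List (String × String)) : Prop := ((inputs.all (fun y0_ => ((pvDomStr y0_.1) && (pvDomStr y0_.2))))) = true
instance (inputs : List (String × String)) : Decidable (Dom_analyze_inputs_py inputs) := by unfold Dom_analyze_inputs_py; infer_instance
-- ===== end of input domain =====

-- B inverts the traversal: one pass over the input keys through a key->category index,
-- collecting the hit categories as a set, then a fixed emit phase (objective: alternative).

-- ===== PORT A =====
-- 'key in inputs' (dict membership) = key occurs among the association list's keys
def pvHasKey (inputs : List (String × String)) (k : String) : Bool :=
  inputs.any (fun p => p.1 == k)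

def analyze_inputs_py (inputs : List (String × String)) : List String :=
  let required_tools : List String := []
  let required_tools :=
    if (["image_path", "screenshot", "ui_image"].any (fun key => pvHasKey inputs key)) then
      required_tools ++ ["vision_detect", "ocr"] else required_tools
  let required_tools :=
    if (["nl_spec", "specification", "requirements"].any (fun key => pvHasKey inputs key)) then
      required_tools ++ ["nl2api"] else required_tools
  let required_tools :=
    if (["components", "layout_graph"].any (fun key => pvHasKey inputs key)) then
      required_tools ++ ["ui2code"] else required_tools
  let required_tools :=
    if (["code_path", "files", "directory"].any (fun key => pvHasKey inputs key)) then
      required_tools ++ ["quality"] else required_tools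
  let required_tools :=
    if (["openapi_spec", "api_endpoints"].any (fun key => pvHasKey inputs key)) then
      required_tools ++ ["doc_gen"] else required_tools
  required_tools

-- ===== PORT B =====
-- the _KEY_CAT dict: inverted index key -> category number
def pvKeyCat : PySem.Dict String Int := PySem.Dict.ofList
  [ ("image_path", 0), ("screenshot", 0), ("ui_image", 0),
    ("nl_spec", 1), ("specification", 1), ("requirements", 1),
    ("components", 2), ("layout_graph", 2),
    ("code_path", 3), ("files", 3), ("directory", 3),
    ("openapi_spec", 4), ("api_endpoints", 4) ]

-- the _CAT_TOOLS list
def pvCatTools : List (List String) :=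
  [["vision_detect", "ocr"], ["nl2api"], ["ui2code"], ["quality"], ["doc_gen"]]

-- first loop of B: the set of categories hit by the input keys (hit, built by set.add)
def pvHit (inputs : List (String × String)) : PySem.Set Int :=
  inputs.foldl
    (fun s p =>
      match PySem.Dict.get? pvKeyCat p.1 with
      | some cat => PySem.Set.add s cat
      | none => s)
    PySem.Set.empty

-- second loop of B: 'for cat in range(5): if cat in hit: required_tools.extend(_CAT_TOOLS[cat])'
-- (only MEMBERSHIP of the set is consumed, never its iteration order)
def analyze_inputs_py_alt (inputs : List (String × String)) : List String :=
  let hit := pvHit inputs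
  (PySem.List.pyRange 0 5 1).foldl
    (fun required_tools cat =>
      if PySem.Set.contains hit cat then
        required_tools ++ PySem.List.pyGetD pvCatTools cat []
      else required_tools)
    []

-- ===== PRECONDITION & SPEC =====
def Spec_analyze_inputs_py (inputs : List (String × String)) (out : List String) : Prop := out = analyze_inputs_py_alt inputs
instance (inputs : List (String × String)) (out : List String) : Decidable (Spec_analyze_inputs_py inputs out) := by unfold Spec_analyze_inputs_py; infer_instance

-- ===== CLAIM (what is proved, stated in full; the proofs are below) =====
def Claim_equal_analyze_inputs_py : Prop := ∀ (inputs : List (String × String)), Dom_analyze_inputs_py inputs → Spec_analyze_inputs_py inputs (analyze_inputs_py inputs)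

-- ===== LEMMAS AND PROOFS =====

-- invariant of B's first loop: the accumulated set contains c iff it already did
-- or some scanned key maps to category c
theorem contains_foldl (inputs : List (String × String)) (s : PySem.Set Int) (c : Int) :
    PySem.Set.contains (inputs.foldl
      (fun s p =>
        match PySem.Dict.get? pvKeyCat p.1 with
        | some cat => PySem.Set.add s cat
        | none => s) s) c
      = (PySem.Set.contains s c || inputs.any (fun p => PySem.Dict.get? pvKeyCat p.1 == some c)) := by
  induction inputs generalizing s with
  | nil => simp
  | cons p t ih =>
    simp only [List.foldl_cons, List.any_cons, ih]
    cases hg : PySem.Dict.get? pvKeyCat p.1 with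
    | none => simp
    | some d =>
      by_cases hc : c = d
      · simp [hc]
      · have hb : (d == c) = false := by simpa using Ne.symm hc
        simp [hb, hc]

theorem contains_pvHit (inputs : List (String × String)) (c : Int) :
    PySem.Set.contains (pvHit inputs) c
      = inputs.any (fun p => PySem.Dict.get? pvKeyCat p.1 == some c) := by
  rw [pvHit, contains_foldl]
  simp [PySem.Set.empty, PySem.Set.contains]

-- the inverted index as an if-chain over the thirteen keys
theorem get?_pvKeyCat (k : String) :
    PySem.Dict.get? pvKeyCat k =
      (if k = "image_path" then some 0 else if k = "screenshot" then some 0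
       else if k = "ui_image" then some 0 else if k = "nl_spec" then some 1
       else if k = "specification" then some 1 else if k = "requirements" then some 1
       else if k = "components" then some 2 else if k = "layout_graph" then some 2
       else if k = "code_path" then some 3 else if k = "files" then some 3
       else if k = "directory" then some 3 else if k = "openapi_spec" then some 4
       else if k = "api_endpoints" then some 4 else none) := by
  by_cases h1 : k = "image_path"; · subst h1; decide
  by_cases h2 : k = "screenshot"; · subst h2; decide
  by_cases h3 : k = "ui_image"; · subst h3; decide
  by_cases h4 : k = "nl_spec"; · subst h4; decide
  by_cases h5 : k = "specification"; · subst h5; decide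
  by_cases h6 : k = "requirements"; · subst h6; decide
  by_cases h7 : k = "components"; · subst h7; decide
  by_cases h8 : k = "layout_graph"; · subst h8; decide
  by_cases h9 : k = "code_path"; · subst h9; decide
  by_cases h10 : k = "files"; · subst h10; decide
  by_cases h11 : k = "directory"; · subst h11; decide
  by_cases h12 : k = "openapi_spec"; · subst h12; decide
  by_cases h13 : k = "api_endpoints"; · subst h13; decide
  rw [show pvKeyCat = PySem.Dict.mk
    [ ("image_path", 0), ("screenshot", 0), ("ui_image", 0),
      ("nl_spec", 1), ("specification", 1), ("requirements", 1),
      ("components", 2), ("layout_graph", 2),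
      ("code_path", 3), ("files", 3), ("directory", 3),
      ("openapi_spec", 4), ("api_endpoints", 4) ] from by decide]
  simp only [PySem.Dict.get?_mk_cons, beq_iff_eq]
  simp [Ne.symm h1, Ne.symm h2, Ne.symm h3, Ne.symm h4, Ne.symm h5, Ne.symm h6,
    Ne.symm h7, Ne.symm h8, Ne.symm h9, Ne.symm h10, Ne.symm h11, Ne.symm h12, Ne.symm h13,
    h1, h2, h3, h4, h5, h6, h7, h8, h9, h10, h11, h12, h13, PySem.Dict.get?]

theorem keyCat_none (k : String)
    (h1 : ¬ k = "image_path") (h2 : ¬ k = "screenshot") (h3 : ¬ k = "ui_image")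
    (h4 : ¬ k = "nl_spec") (h5 : ¬ k = "specification") (h6 : ¬ k = "requirements")
    (h7 : ¬ k = "components") (h8 : ¬ k = "layout_graph") (h9 : ¬ k = "code_path")
    (h10 : ¬ k = "files") (h11 : ¬ k = "directory") (h12 : ¬ k = "openapi_spec")
    (h13 : ¬ k = "api_endpoints") :
    PySem.Dict.get? pvKeyCat k = none := by
  rw [get?_pvKeyCat]
  simp [h1, h2, h3, h4, h5, h6, h7, h8, h9, h10, h11, h12, h13]

theorem keyCat_zero (k : String) :
    (PySem.Dict.get? pvKeyCat k == some 0) = (k == "image_path" || k == "screenshot" || k == "ui_image") := by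
  by_cases h1 : k = "image_path"; · subst h1; decide
  by_cases h2 : k = "screenshot"; · subst h2; decide
  by_cases h3 : k = "ui_image"; · subst h3; decide
  by_cases h4 : k = "nl_spec"; · subst h4; decide
  by_cases h5 : k = "specification"; · subst h5; decide
  by_cases h6 : k = "requirements"; · subst h6; decide
  by_cases h7 : k = "components"; · subst h7; decide
  by_cases h8 : k = "layout_graph"; · subst h8; decide
  by_cases h9 : k = "code_path"; · subst h9; decide
  by_cases h10 : k = "files"; · subst h10; decide
  by_cases h11 : k = "directory"; · subst h11; decide
  by_cases h12 : k = "openapi_spec"; · subst h12; decide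
  by_cases h13 : k = "api_endpoints"; · subst h13; decide
  rw [keyCat_none k h1 h2 h3 h4 h5 h6 h7 h8 h9 h10 h11 h12 h13]
  simp [beq_eq_decide, h1, h2, h3]

theorem keyCat_one (k : String) :
    (PySem.Dict.get? pvKeyCat k == some 1) = (k == "nl_spec" || k == "specification" || k == "requirements") := by
  by_cases h1 : k = "image_path"; · subst h1; decide
  by_cases h2 : k = "screenshot"; · subst h2; decide
  by_cases h3 : k = "ui_image"; · subst h3; decide
  by_cases h4 : k = "nl_spec"; · subst h4; decide
  by_cases h5 : k = "specification"; · subst h5; decide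
  by_cases h6 : k = "requirements"; · subst h6; decide
  by_cases h7 : k = "components"; · subst h7; decide
  by_cases h8 : k = "layout_graph"; · subst h8; decide
  by_cases h9 : k = "code_path"; · subst h9; decide
  by_cases h10 : k = "files"; · subst h10; decide
  by_cases h11 : k = "directory"; · subst h11; decide
  by_cases h12 : k = "openapi_spec"; · subst h12; decide
  by_cases h13 : k = "api_endpoints"; · subst h13; decide
  rw [keyCat_none k h1 h2 h3 h4 h5 h6 h7 h8 h9 h10 h11 h12 h13]
  simp [beq_eq_decide, h4, h5, h6]

theorem keyCat_two (k : String) :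
    (PySem.Dict.get? pvKeyCat k == some 2) = (k == "components" || k == "layout_graph") := by
  by_cases h1 : k = "image_path"; · subst h1; decide
  by_cases h2 : k = "screenshot"; · subst h2; decide
  by_cases h3 : k = "ui_image"; · subst h3; decide
  by_cases h4 : k = "nl_spec"; · subst h4; decide
  by_cases h5 : k = "specification"; · subst h5; decide
  by_cases h6 : k = "requirements"; · subst h6; decide
  by_cases h7 : k = "components"; · subst h7; decide
  by_cases h8 : k = "layout_graph"; · subst h8; decide
  by_cases h9 : k = "code_path"; · subst h9; decide
  by_cases h10 : k = "files"; · subst h10; decide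
  by_cases h11 : k = "directory"; · subst h11; decide
  by_cases h12 : k = "openapi_spec"; · subst h12; decide
  by_cases h13 : k = "api_endpoints"; · subst h13; decide
  rw [keyCat_none k h1 h2 h3 h4 h5 h6 h7 h8 h9 h10 h11 h12 h13]
  simp [beq_eq_decide, h7, h8]

theorem keyCat_three (k : String) :
    (PySem.Dict.get? pvKeyCat k == some 3) = (k == "code_path" || k == "files" || k == "directory") := by
  by_cases h1 : k = "image_path"; · subst h1; decide
  by_cases h2 : k = "screenshot"; · subst h2; decide
  by_cases h3 : k = "ui_image"; · subst h3; decide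
  by_cases h4 : k = "nl_spec"; · subst h4; decide
  by_cases h5 : k = "specification"; · subst h5; decide
  by_cases h6 : k = "requirements"; · subst h6; decide
  by_cases h7 : k = "components"; · subst h7; decide
  by_cases h8 : k = "layout_graph"; · subst h8; decide
  by_cases h9 : k = "code_path"; · subst h9; decide
  by_cases h10 : k = "files"; · subst h10; decide
  by_cases h11 : k = "directory"; · subst h11; decide
  by_cases h12 : k = "openapi_spec"; · subst h12; decide
  by_cases h13 : k = "api_endpoints"; · subst h13; decide
  rw [keyCat_none k h1 h2 h3 h4 h5 h6 h7 h8 h9 h10 h11 h12 h13]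
  simp [beq_eq_decide, h9, h10, h11]

theorem keyCat_four (k : String) :
    (PySem.Dict.get? pvKeyCat k == some 4) = (k == "openapi_spec" || k == "api_endpoints") := by
  by_cases h1 : k = "image_path"; · subst h1; decide
  by_cases h2 : k = "screenshot"; · subst h2; decide
  by_cases h3 : k = "ui_image"; · subst h3; decide
  by_cases h4 : k = "nl_spec"; · subst h4; decide
  by_cases h5 : k = "specification"; · subst h5; decide
  by_cases h6 : k = "requirements"; · subst h6; decide
  by_cases h7 : k = "components"; · subst h7; decide
  by_cases h8 : k = "layout_graph"; · subst h8; decide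
  by_cases h9 : k = "code_path"; · subst h9; decide
  by_cases h10 : k = "files"; · subst h10; decide
  by_cases h11 : k = "directory"; · subst h11; decide
  by_cases h12 : k = "openapi_spec"; · subst h12; decide
  by_cases h13 : k = "api_endpoints"; · subst h13; decide
  rw [keyCat_none k h1 h2 h3 h4 h5 h6 h7 h8 h9 h10 h11 h12 h13]
  simp [beq_eq_decide, h12, h13]

theorem cond_zero (inputs : List (String × String)) :
    (inputs.any fun p => p.1 == "image_path" || p.1 == "screenshot" || p.1 == "ui_image")
      = (["image_path", "screenshot", "ui_image"].any (fun key => pvHasKey inputs key)) := by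
  rw [Bool.eq_iff_iff]
  simp [pvHasKey, List.any_eq_true]
  constructor
  · rintro ⟨a, ⟨x, hx⟩, (rfl | rfl) | rfl⟩ <;> [exact Or.inl ⟨x, hx⟩; exact Or.inr (Or.inl ⟨x, hx⟩); exact Or.inr (Or.inr ⟨x, hx⟩)]
  · rintro (⟨x, hx⟩ | ⟨x, hx⟩ | ⟨x, hx⟩) <;> exact ⟨_, ⟨x, hx⟩, by simp⟩

theorem cond_one (inputs : List (String × String)) :
    (inputs.any fun p => p.1 == "nl_spec" || p.1 == "specification" || p.1 == "requirements")
      = (["nl_spec", "specification", "requirements"].any (fun key => pvHasKey inputs key)) := by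
  rw [Bool.eq_iff_iff]
  simp [pvHasKey, List.any_eq_true]
  constructor
  · rintro ⟨a, ⟨x, hx⟩, (rfl | rfl) | rfl⟩ <;> [exact Or.inl ⟨x, hx⟩; exact Or.inr (Or.inl ⟨x, hx⟩); exact Or.inr (Or.inr ⟨x, hx⟩)]
  · rintro (⟨x, hx⟩ | ⟨x, hx⟩ | ⟨x, hx⟩) <;> exact ⟨_, ⟨x, hx⟩, by simp⟩

theorem cond_two (inputs : List (String × String)) :
    (inputs.any fun p => p.1 == "components" || p.1 == "layout_graph")
      = (["components", "layout_graph"].any (fun key => pvHasKey inputs key)) := by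
  rw [Bool.eq_iff_iff]
  simp [pvHasKey, List.any_eq_true]
  constructor
  · rintro ⟨a, ⟨x, hx⟩, rfl | rfl⟩ <;> [exact Or.inl ⟨x, hx⟩; exact Or.inr ⟨x, hx⟩]
  · rintro (⟨x, hx⟩ | ⟨x, hx⟩) <;> exact ⟨_, ⟨x, hx⟩, by simp⟩

theorem cond_three (inputs : List (String × String)) :
    (inputs.any fun p => p.1 == "code_path" || p.1 == "files" || p.1 == "directory")
      = (["code_path", "files", "directory"].any (fun key => pvHasKey inputs key)) := by
  rw [Bool.eq_iff_iff]
  simp [pvHasKey, List.any_eq_true]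
  constructor
  · rintro ⟨a, ⟨x, hx⟩, (rfl | rfl) | rfl⟩ <;> [exact Or.inl ⟨x, hx⟩; exact Or.inr (Or.inl ⟨x, hx⟩); exact Or.inr (Or.inr ⟨x, hx⟩)]
  · rintro (⟨x, hx⟩ | ⟨x, hx⟩ | ⟨x, hx⟩) <;> exact ⟨_, ⟨x, hx⟩, by simp⟩

theorem cond_four (inputs : List (String × String)) :
    (inputs.any fun p => p.1 == "openapi_spec" || p.1 == "api_endpoints")
      = (["openapi_spec", "api_endpoints"].any (fun key => pvHasKey inputs key)) := by
  rw [Bool.eq_iff_iff]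
  simp [pvHasKey, List.any_eq_true]
  constructor
  · rintro ⟨a, ⟨x, hx⟩, rfl | rfl⟩ <;> [exact Or.inl ⟨x, hx⟩; exact Or.inr ⟨x, hx⟩]
  · rintro (⟨x, hx⟩ | ⟨x, hx⟩) <;> exact ⟨_, ⟨x, hx⟩, by simp⟩

-- ===== VERDICT (by name: the statement is the Claim_ definition above) =====
theorem analyze_inputs_py_spec : Claim_equal_analyze_inputs_py := by
  intro inputs _
  unfold Spec_analyze_inputs_py analyze_inputs_py analyze_inputs_py_alt
  rw [show PySem.List.pyRange 0 5 1 = [0, 1, 2, 3, 4] from by decide]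
  simp only [List.foldl_cons, List.foldl_nil, contains_pvHit,
    keyCat_zero, keyCat_one, keyCat_two, keyCat_three, keyCat_four,
    cond_zero, cond_one, cond_two, cond_three, cond_four,
    show PySem.List.pyGetD pvCatTools 0 [] = ["vision_detect", "ocr"] from by decide,
    show PySem.List.pyGetD pvCatTools 1 [] = ["nl2api"] from by decide,
    show PySem.List.pyGetD pvCatTools 2 [] = ["ui2code"] from by decide,
    show PySem.List.pyGetD pvCatTools 3 [] = ["quality"] from by decide,
    show PySem.List.pyGetD pvCatTools 4 [] = ["doc_gen"] from by decide]
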